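-- pv_equiv track=rewrite | github.com/daniel-reich/ubiquitous-fiesta | vudQZFD64nDWkKz8a_11.py | grant_the_hint
-- ===== SOURCE A (Python) =====
-- def grant_the_hint(txt):
--     words = txt.split()
--     Hint = []
--     for i in range(0,len(str(max(words, key=len)))+1):
--         Sentence = ""
--         for word in words:
--             Sentence += word[:i].ljust(len(word),"_") + " "
--         Hint.append(Sentence[:len(Sentence)-1])
--
--     return Hint
-- ===== SOURCE B (Python) =====
-- def grant_the_hint(txt):
--     words = txt.split()
--     depth = len(str(max(words, key=len))) + 1
--     # build the fully masked sentence once, remembering each word's offset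
--     buf = []
--     starts = []
--     pos = 0
--     for w in words:
--         starts.append(pos)
--         buf.extend("_" * len(w))
--         buf.append(" ")
--         pos += len(w) + 1
--     buf.pop()  # drop the trailing space
--     hints = ["".join(buf)]
--     # reveal one more character per round by in-place substitution
--     for i in range(1, depth):
--         for s, w in zip(starts, words):
--             if i - 1 < len(w):
--                 buf[s + i - 1] = w[i - 1]
--         hints.append("".join(buf))
--     return hints
-- ===== Notes on version B (the rewrite author's own statement) =====
-- stated objective: alternative
-- what changed: B builds the fully masked space-joined sentence once together with each word's start offset, then produces each successive hint by in-place substitution of one newly revealed character per word into that persistent buffer, instead of A's recomputation of every word's padded prefix (slice + ljust) from scratch at every reveal depth.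
import Mathlib
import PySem

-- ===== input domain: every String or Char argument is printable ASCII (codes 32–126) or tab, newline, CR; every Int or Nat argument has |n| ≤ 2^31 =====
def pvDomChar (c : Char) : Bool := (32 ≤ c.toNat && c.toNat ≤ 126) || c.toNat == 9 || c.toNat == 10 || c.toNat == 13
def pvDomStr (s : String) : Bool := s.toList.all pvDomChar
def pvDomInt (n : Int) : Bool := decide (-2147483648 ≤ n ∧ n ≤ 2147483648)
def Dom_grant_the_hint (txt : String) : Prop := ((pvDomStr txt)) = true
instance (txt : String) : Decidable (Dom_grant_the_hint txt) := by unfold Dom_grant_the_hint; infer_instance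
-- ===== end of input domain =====

-- B builds the fully masked sentence once (with each word's start offset) and then reveals one
-- character per round by in-place substitution into that buffer, instead of A's recomputation of
-- every word's padded prefix from scratch at each depth; alternative decomposition (incremental update).


-- ===== PORT A =====
-- hand port of str.ljust(width, fill): exact — pads on the right up to width (no-op if already that long)
def pvLjust (cs : List Char) (width : Int) (fill : Char) : List Char :=
  cs ++ List.replicate (width - cs.length).toNat fill

def grant_the_hint (txt : String) : List String :=
  let words := (PySem.Str.split₀ txt).map String.toList
  match PySem.List.max? words (fun w => PySem.List.len w) with
  | none => []  -- max() raises ValueError on empty words; excluded by Pre_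
  | some m =>
    (PySem.List.pyRange 0 (PySem.List.len m + 1) 1).foldl (fun Hint i =>
      let Sentence := words.foldl (fun S word =>
        S ++ (pvLjust (PySem.List.slice word none (some i)) (PySem.List.len word) '_' ++ [' '])) []
      Hint ++ [String.ofList (PySem.List.slice Sentence none (some (PySem.List.len Sentence - 1)))]) []

-- ===== PORT B =====
def grant_the_hint_alt (txt : String) : List String :=
  let words := (PySem.Str.split₀ txt).map String.toList
  match PySem.List.max? words (fun w => PySem.List.len w) with
  | none => []  -- max() raises ValueError on empty words; excluded by Pre_
  | some m =>
    let depth := PySem.List.len m + 1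
    -- for w in words: starts.append(pos); buf.extend("_"*len(w)); buf.append(" "); pos += len(w)+1
    let st := words.foldl (fun (st : List Char × List Int × Int) w =>
      (st.1 ++ List.replicate w.length '_' ++ [' '], st.2.1 ++ [st.2.2], st.2.2 + PySem.List.len w + 1))
      ([], [], 0)
    -- buf.pop(): words ≠ [] here (max? returned some), so buf ends with the ' ' just appended
    let buf0 := st.1.dropLast
    let starts := st.2.1
    let fin := (PySem.List.pyRange 1 depth 1).foldl (fun (st2 : List Char × List String) i =>
      let buf' := (starts.zip words).foldl (fun b sw =>
        if i - 1 < PySem.List.len sw.2 then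
          -- under the guard 0 ≤ i-1 < len(w) and s+i-1 is in range, so the total forms are exact
          PySem.List.pySetD b (sw.1 + i - 1) (PySem.List.pyGetD sw.2 (i - 1) '_')
        else b) st2.1
      (buf', st2.2 ++ [String.ofList buf'])) (buf0, [String.ofList buf0])
    fin.2

-- ===== PRECONDITION & SPEC =====
-- Pre_ excludes exactly the whitespace-only inputs, on which max(words, key=len) raises ValueError in both A and B.
def Pre_grant_the_hint (txt : String) : Prop := PySem.Str.split₀ txt ≠ []
instance (txt : String) : Decidable (Pre_grant_the_hint txt) := by unfold Pre_grant_the_hint; infer_instance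
def pvWitness_grant_the_hint : String := "hi you"
def Spec_grant_the_hint (txt : String) (out : List String) : Prop := out = grant_the_hint_alt txt
instance (txt : String) (out : List String) : Decidable (Spec_grant_the_hint txt out) := by unfold Spec_grant_the_hint; infer_instance

-- ===== CLAIM (what is proved, stated in full; the proofs are below) =====
def Claim_equal_grant_the_hint : Prop := ∀ (txt : String), Dom_grant_the_hint txt → Pre_grant_the_hint txt → Spec_grant_the_hint txt (grant_the_hint txt)

-- ===== LEMMAS AND PROOFS =====

-- the word w with its first n characters revealed and the rest masked
def pvRev (n : Nat) (w : List Char) : List Char := w.take n ++ List.replicate (w.length - n) '_'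

-- the start offsets of the words in the space-joined sentence, first word at p
def pvOffs (p : Int) : List (List Char) → List Int
  | [] => []
  | w :: ws => p :: pvOffs (p + ↑w.length + 1) ws

theorem pvRev_length (n : Nat) (w : List Char) : (pvRev n w).length = w.length := by
  simp [pvRev]; omega

theorem pvRev_eq_self (n : Nat) (w : List Char) (h : w.length ≤ n) : pvRev n w = w := by
  simp [pvRev, List.take_of_length_le h, Nat.sub_eq_zero_of_le h]

theorem setapp (a b : List Char) (k : Nat) (c : Char) :
    (a ++ b).set (a.length + k) c = a ++ b.set k c := by
  induction a with
  | nil => simp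
  | cons x t ih => simp [Nat.succ_add, ih]

theorem revset (w : List Char) (k : Nat) (h : k < w.length) :
    (pvRev k w).set k w[k] = pvRev (k + 1) w := by
  unfold pvRev
  have h1 : (w.take k).length = k := by simp; omega
  have h0 := setapp (w.take k) (List.replicate (w.length - k) '_') 0 w[k]
  rw [h1, Nat.add_zero] at h0
  have h2 : w.length - k = w.length - (k + 1) + 1 := by omega
  rw [h0, h2, List.replicate_succ, List.take_succ_eq_append_getElem h]
  simp only [List.set_cons_zero, List.append_assoc, List.cons_append, List.nil_append]

-- A's cell word[:i].ljust(len(word), '_') is the reveal of the first i characters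
theorem cellA_eq_rev (w : List Char) (i : Int) (hi : 0 ≤ i) :
    pvLjust (PySem.List.slice w none (some i)) (PySem.List.len w) '_' = pvRev i.toNat w := by
  rw [PySem.List.slice_to w hi]
  unfold pvLjust pvRev
  have : ((PySem.List.len w) - ((w.take i.toNat).length : Int)).toNat = w.length - i.toNat := by
    simp [PySem.List.len_eq]; omega
  rw [this]

-- A's sentence loop flattens to words' cells each followed by a space
theorem sentence_flat (g : List Char → List Char) (ws : List (List Char)) :
    ws.foldl (fun S word => S ++ (g word ++ [' '])) []
      = ((ws.map g).map (fun c => c ++ [' '])).flatten := by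
  rw [PySem.List.foldl_append_eq_flatMap (fun word => g word ++ [' ']) ws []]
  simp [List.flatMap, List.map_map, Function.comp_def]

-- dropping the final space of the flattened sentence is a ' '-join
theorem flat_dropLast_join (cells : List (List Char)) (h : cells ≠ []) :
    ((cells.map (fun c => c ++ [' '])).flatten).dropLast
      = PySem.Chars.join [' '] cells := by
  induction cells with
  | nil => exact absurd rfl h
  | cons c rest ih =>
    cases rest with
    | nil => simp [PySem.Chars.join_singleton]
    | cons d rest' =>
      rw [PySem.Chars.join_cons_cons, List.map_cons, List.flatten_cons,
        List.dropLast_append_of_ne_nil (by simp), ih (by simp)]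

theorem flatten_map_singleton {α β : Type} (l : List α) (h : α → β) :
    List.flatMap (fun i => [h i]) l = l.map h := by
  induction l with
  | nil => rfl
  | cons a t ih => simp [ih]

-- B's first fold: the masked buffer, the offsets and the final position
theorem initFold (ws : List (List Char)) : ∀ (b : List Char) (s : List Int) (p : Int),
    ws.foldl (fun (st : List Char × List Int × Int) w =>
        (st.1 ++ List.replicate w.length '_' ++ [' '], st.2.1 ++ [st.2.2], st.2.2 + PySem.List.len w + 1))
      (b, s, p)
    = (b ++ (ws.map (fun w => List.replicate w.length '_' ++ [' '])).flatten,
       s ++ pvOffs p ws,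
       p + (ws.map (fun w => (w.length : Int) + 1)).sum) := by
  induction ws with
  | nil => intro b s p; simp [pvOffs]
  | cons w t ih =>
    intro b s p
    rw [List.foldl_cons, ih]
    simp [pvOffs, PySem.List.len_eq]
    ring

-- B's reveal round i turns the level-(i-1) sentence into the level-i sentence
theorem innerFold (i : Int) (hi : 1 ≤ i) : ∀ (ws : List (List Char)) (p : List Char),
    ((pvOffs (p.length : Int) ws).zip ws).foldl (fun b sw =>
        if i - 1 < PySem.List.len sw.2 then
          PySem.List.pySetD b (sw.1 + i - 1) (PySem.List.pyGetD sw.2 (i - 1) '_')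
        else b)
      (p ++ PySem.Chars.join [' '] (ws.map (pvRev (i - 1).toNat)))
    = p ++ PySem.Chars.join [' '] (ws.map (pvRev i.toNat)) := by
  intro ws
  induction ws with
  | nil => intro p; simp [pvOffs, PySem.Chars.join_nil]
  | cons w t ih =>
    intro p
    have hstep : ∀ (R : List Char),
        (if i - 1 < PySem.List.len w then
          PySem.List.pySetD (p ++ (pvRev (i - 1).toNat w ++ R)) ((p.length : Int) + i - 1)
            (PySem.List.pyGetD w (i - 1) '_')
        else (p ++ (pvRev (i - 1).toNat w ++ R)))
        = p ++ (pvRev i.toNat w ++ R) := by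
      intro R
      by_cases hw : i - 1 < PySem.List.len w
      · rw [if_pos hw]
        have hk : (i - 1).toNat < w.length := by
          simp [PySem.List.len_eq] at hw; omega
        rw [PySem.List.pyGetD_eq_getElem w '_' (by omega) (by simp [PySem.List.len_eq] at hw ⊢; omega)]
        rw [PySem.List.pySetD_of_nonneg _ _ (by omega)]
        have hidx : ((p.length : Int) + i - 1).toNat = p.length + (i - 1).toNat := by omega
        rw [hidx, setapp]
        rw [List.set_append_left _ _ (by rw [pvRev_length]; exact hk)]
        have : w[(i - 1).toNat] = w[(i - 1).toNat]'hk := rfl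
        rw [revset w (i - 1).toNat hk]
        have : (i - 1).toNat + 1 = i.toNat := by omega
        rw [this]
      · rw [if_neg hw]
        have hw' : w.length ≤ (i - 1).toNat := by
          simp [PySem.List.len_eq] at hw; omega
        rw [pvRev_eq_self _ _ hw', pvRev_eq_self _ _ (by omega)]
    cases t with
    | nil =>
      simp only [pvOffs, List.map_cons, List.map_nil, PySem.Chars.join_singleton,
        List.zip_cons_cons, List.zip_nil_left, List.foldl_cons, List.foldl_nil]
      have := hstep []
      simpa using this
    | cons w2 t2 =>
      simp only [pvOffs, List.map_cons, PySem.Chars.join_cons_cons, List.zip_cons_cons,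
        List.foldl_cons]
      have e1 : p ++ (pvRev (i - 1).toNat w ++ [' '] ++ PySem.Chars.join [' '] (pvRev (i - 1).toNat w2 :: t2.map (pvRev (i - 1).toNat)))
          = p ++ (pvRev (i - 1).toNat w ++ ([' '] ++ PySem.Chars.join [' '] (pvRev (i - 1).toNat w2 :: t2.map (pvRev (i - 1).toNat)))) := by
        simp [List.append_assoc]
      have hrw := hstep ([' '] ++ PySem.Chars.join [' '] (pvRev (i - 1).toNat w2 :: t2.map (pvRev (i - 1).toNat)))
      have e2 : (p ++ (pvRev i.toNat w ++ [' '])).length = p.length + w.length + 1 := by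
        simp [pvRev_length]; omega
      have hih := ih (p ++ (pvRev i.toNat w ++ [' ']))
      rw [e2] at hih
      push_cast at hih
      -- align the accumulators and the offset lists
      have goal1 : (p.length : Int) + (w.length : Int) + 1 = (p.length : Int) + (w.length : Int) + 1 := rfl
      calc ((pvOffs ((p.length : Int) + (w.length : Int) + 1) (w2 :: t2)).zip (w2 :: t2)).foldl
              (fun b sw => if i - 1 < PySem.List.len sw.2 then
                PySem.List.pySetD b (sw.1 + i - 1) (PySem.List.pyGetD sw.2 (i - 1) '_') else b)
              (if i - 1 < PySem.List.len w then
                PySem.List.pySetD (p ++ (pvRev (i - 1).toNat w ++ [' '] ++ PySem.Chars.join [' '] (pvRev (i - 1).toNat w2 :: t2.map (pvRev (i - 1).toNat)))) ((p.length : Int) + i - 1)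
                  (PySem.List.pyGetD w (i - 1) '_')
              else (p ++ (pvRev (i - 1).toNat w ++ [' '] ++ PySem.Chars.join [' '] (pvRev (i - 1).toNat w2 :: t2.map (pvRev (i - 1).toNat)))))
          = ((pvOffs ((p.length : Int) + (w.length : Int) + 1) (w2 :: t2)).zip (w2 :: t2)).foldl
              (fun b sw => if i - 1 < PySem.List.len sw.2 then
                PySem.List.pySetD b (sw.1 + i - 1) (PySem.List.pyGetD sw.2 (i - 1) '_') else b)
              ((p ++ (pvRev i.toNat w ++ [' '])) ++ PySem.Chars.join [' '] ((w2 :: t2).map (pvRev (i - 1).toNat))) := by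
              congr 1
              rw [e1, hstep]
              simp [List.append_assoc]
        _ = (p ++ (pvRev i.toNat w ++ [' '])) ++ PySem.Chars.join [' '] ((w2 :: t2).map (pvRev i.toNat)) := hih
        _ = p ++ (pvRev i.toNat w ++ [' '] ++ PySem.Chars.join [' '] (pvRev i.toNat w2 :: t2.map (pvRev i.toNat))) := by
              simp [List.append_assoc]

-- B's outer loop appends one joined sentence per reveal level
theorem outerFold (ws : List (List Char)) (d : Int) :
    ∀ (n : Nat) (a : Int), 1 ≤ a → (d - a).toNat = n → ∀ (hs : List String),
    ∃ bf, (PySem.List.pyRange a d 1).foldl (fun (st2 : List Char × List String) i =>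
        let buf' := ((pvOffs 0 ws).zip ws).foldl (fun b sw =>
          if i - 1 < PySem.List.len sw.2 then
            PySem.List.pySetD b (sw.1 + i - 1) (PySem.List.pyGetD sw.2 (i - 1) '_')
          else b) st2.1
        (buf', st2.2 ++ [String.ofList buf']))
      (PySem.Chars.join [' '] (ws.map (pvRev (a - 1).toNat)), hs)
    = (bf, hs ++ (PySem.List.pyRange a d 1).map (fun i =>
        String.ofList (PySem.Chars.join [' '] (ws.map (pvRev i.toNat))))) := by
  intro n
  induction n with
  | zero =>
    intro a ha hn hs
    rw [PySem.List.pyRange_one_eq_nil (by omega)]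
    exact ⟨PySem.Chars.join [' '] (ws.map (pvRev (a - 1).toNat)), by simp⟩
  | succ k ihk =>
    intro a ha hn hs
    have had : a < d := by omega
    rw [PySem.List.pyRange_one_cons had]
    simp only [List.foldl_cons, List.map_cons]
    have hin := innerFold a ha ws []
    simp only [List.nil_append] at hin
    have hin' : ((pvOffs 0 ws).zip ws).foldl (fun b sw =>
        if a - 1 < PySem.List.len sw.2 then
          PySem.List.pySetD b (sw.1 + a - 1) (PySem.List.pyGetD sw.2 (a - 1) '_')
        else b) (PySem.Chars.join [' '] (ws.map (pvRev (a - 1).toNat)))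
        = PySem.Chars.join [' '] (ws.map (pvRev a.toNat)) := by
      have : ((List.nil (α := Char)).length : Int) = 0 := by simp
      rw [← this]; exact hin
    rw [hin']
    have e : a + 1 - 1 = a := by omega
    obtain ⟨bf, hbf⟩ := ihk (a + 1) (by omega) (by omega)
      (hs ++ [String.ofList (PySem.Chars.join [' '] (ws.map (pvRev a.toNat)))])
    rw [e] at hbf
    exact ⟨bf, by rw [hbf]; simp⟩

theorem grant_the_hint_eq (txt : String) (h : Pre_grant_the_hint txt) :
    grant_the_hint txt = grant_the_hint_alt txt := by
  unfold Pre_grant_the_hint at h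
  unfold grant_the_hint grant_the_hint_alt
  obtain ⟨v₀, vs₀, hw⟩ := List.exists_cons_of_ne_nil h
  simp only [hw, List.map_cons]
  set v := v₀.toList with hv
  set vs := vs₀.map String.toList with hvs
  cases hm : PySem.List.max? (v :: vs) (fun w => PySem.List.len w) with
  | none => rfl
  | some m =>
    simp only []
    set d := PySem.List.len m + 1 with hd
    have hd1 : 1 ≤ d := by simp [hd, PySem.List.len_eq]
    -- ===== A side: each row is the ' '-join of the reveal cells =====
    have hA : (PySem.List.pyRange 0 d 1).foldl (fun Hint i =>
        let Sentence := (v :: vs).foldl (fun S word =>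
          S ++ (pvLjust (PySem.List.slice word none (some i)) (PySem.List.len word) '_' ++ [' '])) []
        Hint ++ [String.ofList (PySem.List.slice Sentence none (some (PySem.List.len Sentence - 1)))]) []
        = (PySem.List.pyRange 0 d 1).map (fun i =>
            String.ofList (PySem.Chars.join [' '] ((v :: vs).map (pvRev i.toNat)))) := by
      rw [PySem.List.foldl_append_eq_flatMap _ (PySem.List.pyRange 0 d 1) []]
      rw [List.nil_append, flatten_map_singleton]
      apply List.map_congr_left
      intro i hi
      have hi0 : 0 ≤ i := (PySem.List.mem_pyRange_one.mp hi).1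
      rw [sentence_flat (fun word =>
        pvLjust (PySem.List.slice word none (some i)) (PySem.List.len word) '_') (v :: vs)]
      have hcells : (v :: vs).map (fun word =>
          pvLjust (PySem.List.slice word none (some i)) (PySem.List.len word) '_')
          = (v :: vs).map (pvRev i.toNat) := by
        apply List.map_congr_left; intro w _; exact cellA_eq_rev w i hi0
      rw [hcells]
      set S := (((v :: vs).map (pvRev i.toNat)).map (fun c => c ++ [' '])).flatten with hS
      have hSlen : 1 ≤ S.length := by simp [hS]; omega
      have hlen : PySem.List.len S - 1 = ((S.length - 1 : Nat) : Int) := by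
        simp [PySem.List.len_eq]; omega
      rw [hlen, PySem.List.slice_to _ (by positivity), Int.toNat_natCast,
        ← List.dropLast_eq_take, flat_dropLast_join _ (by simp)]
    rw [hA]
    -- ===== B side =====
    rw [initFold (v :: vs) [] [] 0]
    simp only []
    have hbuf0 : (((v :: vs).map (fun w => List.replicate w.length '_' ++ [' '])).flatten).dropLast
        = PySem.Chars.join [' '] ((v :: vs).map (pvRev 0)) := by
      have : (v :: vs).map (fun w => List.replicate w.length '_' ++ [' '])
          = (((v :: vs).map (pvRev 0)).map (fun c => c ++ [' '])) := by
        simp [pvRev, List.map_map, Function.comp_def]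
      rw [this, flat_dropLast_join _ (by simp)]
    rw [List.nil_append, List.nil_append, hbuf0]
    obtain ⟨bf, hbf⟩ := outerFold (v :: vs) d (d - 1).toNat 1 le_rfl rfl
      [String.ofList (PySem.Chars.join [' '] ((v :: vs).map (pvRev 0)))]
    have e : ((1 : Int) - 1).toNat = 0 := by omega
    rw [e] at hbf
    rw [hbf]
    simp only []
    rw [PySem.List.pyRange_one_cons (by omega : (0 : Int) < d)]
    simp

-- ===== VERDICT (by name: the statement is the Claim_ definition above) =====
theorem grant_the_hint_spec : Claim_equal_grant_the_hint := by
  intro txt _ hpre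
  unfold Spec_grant_the_hint
  exact grant_the_hint_eq txt hpre
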